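-- pv_equiv track=rewrite | github.com/Nadir-T/NBA-MVP | fonctions_utiles.py | score_rank
-- ===== SOURCE A (Python) =====
-- def assign_rank(l):
--     l_rank = []
--     for i in l:
--         buf = 1
--         for j in l:
--             if j>i:
--                 buf+=1
--         l_rank.append([i,buf])
--     return l_rank
--
-- def score_rank(y,y_p):
--     y_rank = assign_rank(y)
--     y_p_rank = assign_rank(y_p)
--     score = 0
--     for i in range(len(y_rank)):
--         if y_rank[i][0] != 0:
--             score += (y_rank[i][1]-y_p_rank[i][1])**2
--     return score
-- ===== SOURCE B (Python) =====
-- def _rank_of(l):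
--     # rank of v = 1 + number of strictly greater elements = position of the
--     # first occurrence of v in the descending-sorted list (1-based)
--     r = {}
--     pos = 1
--     for v in sorted(l, reverse=True):
--         if v not in r:
--             r[v] = pos
--         pos += 1
--     return r
--
-- def score_rank(y, y_p):
--     ry = _rank_of(y)
--     rp = _rank_of(y_p)
--     return sum((ry[y[i]] - rp[y_p[i]]) ** 2 for i in range(len(y)) if y[i] != 0)
-- ===== Notes on version B (the rewrite author's own statement) =====
-- stated objective: faster
-- what changed: A counts strictly-greater elements with a nested O(n^2) scan per list; B sorts each list descending once and assigns each distinct value's rank at its first sorted occurrence, then sums squared rank differences via dict lookups.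
import Mathlib
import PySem

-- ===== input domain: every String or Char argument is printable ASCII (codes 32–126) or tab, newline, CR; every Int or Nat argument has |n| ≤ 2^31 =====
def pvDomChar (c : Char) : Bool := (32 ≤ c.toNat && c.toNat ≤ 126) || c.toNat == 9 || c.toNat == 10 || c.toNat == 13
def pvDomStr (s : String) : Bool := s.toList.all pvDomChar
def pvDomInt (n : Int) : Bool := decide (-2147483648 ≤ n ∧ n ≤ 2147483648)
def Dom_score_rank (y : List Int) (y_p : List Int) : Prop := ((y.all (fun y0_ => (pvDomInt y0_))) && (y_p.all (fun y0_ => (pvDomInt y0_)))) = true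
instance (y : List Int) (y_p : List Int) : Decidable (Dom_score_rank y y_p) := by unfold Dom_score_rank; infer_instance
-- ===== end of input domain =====

-- B replaces A's O(n^2) nested strict-greater count by one descending sort per list,
-- assigning each distinct value's rank at its first sorted occurrence (faster, O(n log n)).

-- ===== PORT A =====
def assign_rank (l : List Int) : List (Int × Int) :=
  l.foldl (fun l_rank i =>
    l_rank ++ [(i, l.foldl (fun buf j => if j > i then buf + 1 else buf) 1)]) []

def score_rank (y : List Int) (y_p : List Int) : Int :=
  let y_rank := assign_rank y
  let y_p_rank := assign_rank y_p
  (PySem.List.pyRange 0 y_rank.length 1).foldl (fun score i =>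
    if (PySem.List.pyGetD y_rank i (0, 0)).1 ≠ 0 then
      score + ((PySem.List.pyGetD y_rank i (0, 0)).2 - (PySem.List.pyGetD y_p_rank i (0, 0)).2) ^ 2
    else score) 0

-- ===== PORT B =====
def rankDict (l : List Int) : PySem.Dict Int Int :=
  ((PySem.List.sorted l (fun x => x) true).foldl
    (fun st v => (if st.1.contains v then st.1 else st.1.insert v st.2, st.2 + 1))
    (PySem.Dict.empty, 1)).1

def score_rank_alt (y : List Int) (y_p : List Int) : Int :=
  let ry := rankDict y
  let rp := rankDict y_p
  (PySem.List.pyRange 0 y.length 1).foldl (fun s i =>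
    if PySem.List.pyGetD y i 0 ≠ 0 then
      s + (ry.getD (PySem.List.pyGetD y i 0) 0 - rp.getD (PySem.List.pyGetD y_p i 0) 0) ^ 2
    else s) 0

-- ===== PRECONDITION & SPEC =====
-- Pre_ excludes exactly the inputs where A raises IndexError: some index i ≥ len(y_p)
-- with y[i] ≠ 0 (B raises there too).
def Pre_score_rank (y : List Int) (y_p : List Int) : Prop :=
  ∀ x ∈ y.drop y_p.length, x = 0
instance (y : List Int) (y_p : List Int) : Decidable (Pre_score_rank y y_p) := by
  unfold Pre_score_rank; infer_instance
def pvWitness_score_rank : List Int × List Int := ([1, 2, 0, 2], [3, 1, 1, 4])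

def Spec_score_rank (y : List Int) (y_p : List Int) (out : Int) : Prop := out = score_rank_alt y y_p
instance (y : List Int) (y_p : List Int) (out : Int) : Decidable (Spec_score_rank y y_p out) := by unfold Spec_score_rank; infer_instance

-- ===== CLAIM (what is proved, stated in full; the proofs are below) =====
def Claim_equal_score_rank : Prop := ∀ (y : List Int) (y_p : List Int), Dom_score_rank y y_p → Pre_score_rank y y_p → Spec_score_rank y y_p (score_rank y y_p)

-- ===== LEMMAS AND PROOFS =====

-- A's rank list, characterised: each element paired with 1 + (# strictly greater in l)
theorem assign_rank_eq (l : List Int) :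
    assign_rank l = l.map (fun v => (v, 1 + (l.countP (fun j => decide (v < j)) : Int))) := by
  unfold assign_rank
  rw [PySem.List.foldl_append_singleton_eq_map, List.nil_append]
  apply List.map_congr_left
  intro i _
  rw [PySem.List.foldl_ite_add_one (p := fun j => i < j)]

-- B's dict-building fold never touches a key already present
theorem rank_fold_preserve (s : List Int) (r : PySem.Dict Int Int) (pos : Int) (v : Int)
    (hv : r.contains v = true) :
    ((s.foldl (fun st x => (if st.1.contains x then st.1 else st.1.insert x st.2, st.2 + 1))
      (r, pos)).1).get? v = r.get? v := by
  induction s generalizing r pos with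
  | nil => rfl
  | cons a t ih =>
    simp only [List.foldl_cons]
    by_cases ha : r.contains a = true
    · simp only [ha, if_true]; exact ih r (pos + 1) hv
    · have hva : v ≠ a := by intro h; rw [h] at hv; exact ha hv
      rw [if_neg ha]
      rw [ih (r.insert a pos) (pos + 1)
        (by rw [PySem.Dict.contains_insert]; simp [hv])]
      exact PySem.Dict.get?_insert_of_ne r pos hva

-- main invariant: on a descending-sorted list, the first-occurrence position of v
-- is 1 + (# strictly greater)
theorem rank_fold_aux (s : List Int) (r : PySem.Dict Int Int) (pos : Int) (v : Int)
    (hsort : s.Pairwise (fun a b => b ≤ a)) (hmem : v ∈ s) (hv : r.contains v = false) :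
    ((s.foldl (fun st x => (if st.1.contains x then st.1 else st.1.insert x st.2, st.2 + 1))
      (r, pos)).1).getD v 0 = pos + (s.countP (fun j => decide (v < j)) : Int) := by
  induction s generalizing r pos with
  | nil => cases hmem
  | cons a t ih =>
    rw [List.pairwise_cons] at hsort
    obtain ⟨hle, htp⟩ := hsort
    by_cases hva : v = a
    · subst hva
      simp only [List.foldl_cons]
      rw [if_neg (by rw [hv]; simp)]
      have h1 : ((t.foldl (fun st x => (if st.1.contains x then st.1 else st.1.insert x st.2, st.2 + 1))
          (r.insert v pos, pos + 1)).1).get? v = some pos := by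
        rw [rank_fold_preserve t _ _ _ (PySem.Dict.contains_insert_self r v pos)]
        exact PySem.Dict.get?_insert_self r v pos
      rw [PySem.Dict.getD_eq_get?_getD, h1]
      have hc : (v :: t).countP (fun j => decide (v < j)) = 0 := by
        rw [List.countP_eq_zero]
        intro j hj
        rcases List.mem_cons.mp hj with rfl | hj
        · simp
        · simpa using not_lt.mpr (hle j hj)
      rw [hc]; simp
    · have hvt : v ∈ t := by
        rcases List.mem_cons.mp hmem with rfl | h
        · exact absurd rfl hva
        · exact h
      have hlt : v < a := lt_of_le_of_ne (hle v hvt) hva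
      have hcount : ((a :: t).countP (fun j => decide (v < j)) : Int)
          = 1 + (t.countP (fun j => decide (v < j)) : Int) := by
        rw [List.countP_cons_of_pos (by simpa using hlt)]
        push_cast; ring
      simp only [List.foldl_cons]
      by_cases ha : r.contains a = true
      · simp only [ha, if_true]
        rw [ih r (pos + 1) htp hvt hv, hcount]; ring
      · rw [if_neg ha]
        rw [ih (r.insert a pos) (pos + 1) htp hvt
          (by rw [PySem.Dict.contains_insert]; simp [hv, hva])]
        rw [hcount]; ring

-- B's rank dict, characterised
theorem rankDict_getD (l : List Int) (v : Int) (hv : v ∈ l) :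
    (rankDict l).getD v 0 = 1 + (l.countP (fun j => decide (v < j)) : Int) := by
  unfold rankDict
  have hperm := PySem.List.sorted_perm (xs := l) (key := fun x => x) (rev := true)
  rw [rank_fold_aux _ _ _ _ (PySem.List.sorted_pairwise_rev l (fun x => x))
    ((PySem.List.mem_sorted l (fun x => x) true v).mpr hv) (PySem.Dict.contains_empty v)]
  rw [hperm.countP_eq]

-- ===== VERDICT (by name: the statement is the Claim_ definition above) =====
theorem score_rank_spec : Claim_equal_score_rank := by
  intro y y_p _ hpre
  simp only [Spec_score_rank, score_rank, score_rank_alt]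
  have hlen : (assign_rank y).length = y.length := by
    rw [assign_rank_eq]; exact List.length_map ..
  rw [hlen]
  apply PySem.List.foldl_congr_mem'
  intro i hi acc
  rw [PySem.List.mem_pyRange_one] at hi
  obtain ⟨h0, hn⟩ := hi
  have hiy : i.toNat < y.length := by omega
  rw [PySem.List.pyGetD_eq_getElem (assign_rank y) (0, 0) h0 (by rw [hlen]; omega),
      PySem.List.pyGetD_eq_getElem y 0 h0 (by omega)]
  simp only [assign_rank_eq, List.getElem_map]
  by_cases hz : y[i.toNat] = 0
  · simp [hz]
  · have hip : i.toNat < y_p.length := by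
      by_contra h
      exact hz (hpre y[i.toNat] (List.mem_drop_iff_getElem.mpr
        ⟨i.toNat - y_p.length, by omega, by congr 1; omega⟩))
    rw [PySem.List.pyGetD_eq_getElem
        (y_p.map (fun v => (v, 1 + (y_p.countP (fun j => decide (v < j)) : Int)))) (0, 0) h0
        (by rw [List.length_map]; omega),
      PySem.List.pyGetD_eq_getElem y_p 0 h0 (by omega)]
    simp only [List.getElem_map]
    rw [rankDict_getD y _ (List.getElem_mem hiy), rankDict_getD y_p _ (List.getElem_mem hip)]
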